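-- pv_equiv track=rewrite | github.com/adiffloth/adventofcode_20 | day16/scratch.py | rule_exclude
-- ===== SOURCE A (Python) =====
-- def rule_exclude(list_i):
--     matched_rules = set()
--     if type(list_i) == int:
--         list_i = [list_i]
--
--     for rule_id, rule in rules.items():
--         include = True
--
--         for i in list_i:
--             if i not in rule[0] and i not in rule[1]:
--                 include = False
--
--         if include:
--             matched_rules.add(rule_id)
--     return matched_rules
--
-- rules = {
--     0: [range(0, 2), range(4, 20)],
--     1: [range(0, 6), range(8, 20)],
--     2: [range(0, 14), range(16, 20)]
-- }
-- ===== SOURCE B (Python) =====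
-- rules = {
--     0: [range(0, 2), range(4, 20)],
--     1: [range(0, 6), range(8, 20)],
--     2: [range(0, 14), range(16, 20)]
-- }
--
-- def rule_exclude(list_i):
--     if type(list_i) == int:
--         list_i = [list_i]
--     matched = set(rules)
--     for i in list_i:
--         matched &= {rid for rid, (r1, r2) in rules.items() if i in r1 or i in r2}
--     return matched
-- ===== Notes on version B (the rewrite author's own statement) =====
-- stated objective: alternative
-- what changed: Replaces the rule-outer/value-inner boolean-flag scan with a value-outer traversal that threads a shrinking candidate set, intersecting it with the set of rules matching each value.
import Mathlib
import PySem

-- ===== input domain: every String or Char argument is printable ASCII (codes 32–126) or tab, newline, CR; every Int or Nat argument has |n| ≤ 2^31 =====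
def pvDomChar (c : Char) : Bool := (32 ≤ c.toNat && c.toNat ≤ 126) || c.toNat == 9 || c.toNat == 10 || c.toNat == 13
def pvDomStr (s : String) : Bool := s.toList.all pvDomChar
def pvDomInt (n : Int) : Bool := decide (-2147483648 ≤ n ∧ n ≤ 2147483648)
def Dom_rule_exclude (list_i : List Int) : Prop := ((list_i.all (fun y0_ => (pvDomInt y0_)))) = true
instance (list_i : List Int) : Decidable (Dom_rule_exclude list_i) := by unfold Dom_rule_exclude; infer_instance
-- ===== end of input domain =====

-- B replaces A's rule-outer flag scan by a value-outer shrinking-candidate-set intersection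
-- (objective: alternative decomposition, same cost).
-- Both programs return a Python set; the List Int result holds its distinct elements (PySem.Set).
-- The Lean signature fixes list_i : List Int, so Python's int-coercion branch is outside its scope.

-- i in range(a, b)
def pvInRange (r : Int × Int) (i : Int) : Bool := r.1 ≤ i && i < r.2

-- ===== PORT A =====
-- the module-level `rules` dict, in insertion order (each range(a,b) as a pair)
def pvRules : List (Int × ((Int × Int) × (Int × Int))) :=
  [(0, ((0, 2), (4, 20))), (1, ((0, 6), (8, 20))), (2, ((0, 14), (16, 20)))]

def rule_exclude (list_i : List Int) : List Int :=
  pvRules.foldl (fun matched_rules rr =>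
      let include_ := list_i.foldl (fun inc i =>
        if !pvInRange rr.2.1 i && !pvInRange rr.2.2 i then false else inc) true
      if include_ then PySem.Set.add matched_rules rr.1 else matched_rules)
    PySem.Set.empty

-- ===== PORT B =====
def pvRulesB : List (Int × ((Int × Int) × (Int × Int))) :=
  [(0, ((0, 2), (4, 20))), (1, ((0, 6), (8, 20))), (2, ((0, 14), (16, 20)))]

-- the set-comprehension {rid for rid, (r1, r2) in rules.items() if i in r1 or i in r2}
def pvMatchSet (i : Int) : List Int :=
  PySem.Set.ofList ((pvRulesB.filter (fun rr => pvInRange rr.2.1 i || pvInRange rr.2.2 i)).map Prod.fst)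

def rule_exclude_alt (list_i : List Int) : List Int :=
  list_i.foldl (fun matched i => PySem.Set.inter matched (pvMatchSet i))
    (PySem.Set.ofList (pvRulesB.map Prod.fst))

-- ===== PRECONDITION & SPEC =====
def Spec_rule_exclude (list_i : List Int) (out : List Int) : Prop := out = rule_exclude_alt list_i
instance (list_i : List Int) (out : List Int) : Decidable (Spec_rule_exclude list_i out) := by unfold Spec_rule_exclude; infer_instance

-- ===== CLAIM (what is proved, stated in full; the proofs are below) =====
def Claim_equal_rule_exclude : Prop := ∀ (list_i : List Int), Dom_rule_exclude list_i → Spec_rule_exclude list_i (rule_exclude list_i)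

-- ===== LEMMAS AND PROOFS =====

-- the per-rule match tests, and the common normal form of both results
def pvM0 (i : Int) : Bool := pvInRange (0, 2) i || pvInRange (4, 20) i
def pvM1 (i : Int) : Bool := pvInRange (0, 6) i || pvInRange (8, 20) i
def pvM2 (i : Int) : Bool := pvInRange (0, 14) i || pvInRange (16, 20) i
def pvNF (list_i : List Int) : List Int :=
  (if list_i.all pvM0 then [(0 : Int)] else []) ++ (if list_i.all pvM1 then [1] else [])
    ++ (if list_i.all pvM2 then [2] else [])

-- A's inner flag loop is `all` of the negated exclusion test
theorem pv_flag_fold (p : Int → Bool) (l : List Int) (b : Bool) :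
    l.foldl (fun inc i => if p i then false else inc) b = (b && l.all (fun i => !p i)) := by
  induction l generalizing b with
  | nil => simp
  | cons x t ih =>
    simp only [List.foldl_cons, List.all_cons, ih]
    cases h : p x <;> simp

-- B's intersection fold filters the accumulator by "matches every value"
theorem pv_inter_fold (l : List Int) (acc : List Int) :
    l.foldl (fun matched i => PySem.Set.inter matched (pvMatchSet i)) acc
      = acc.filter (fun r => l.all (fun i => (pvMatchSet i).contains r)) := by
  induction l generalizing acc with
  | nil => simp
  | cons x t ih =>
    rw [List.foldl_cons, ih]
    simp only [PySem.Set.inter, PySem.Set.contains, List.filter_filter, List.all_cons]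
    exact List.filter_congr (fun a _ => by rw [Bool.and_comm])

-- membership of each rule id in the per-value match set is that rule's test
theorem pv_ms0 (i : Int) : (pvMatchSet i).contains 0 = pvM0 i := by
  cases h0 : pvInRange (0, 2) i || pvInRange (4, 20) i <;>
  cases h1 : pvInRange (0, 6) i || pvInRange (8, 20) i <;>
  cases h2 : pvInRange (0, 14) i || pvInRange (16, 20) i <;>
    simp [pvMatchSet, pvRulesB, pvM0, h0, h1, h2, PySem.Set.ofList, PySem.Set.add,
      PySem.Set.empty, PySem.Set.contains]

theorem pv_ms1 (i : Int) : (pvMatchSet i).contains 1 = pvM1 i := by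
  cases h0 : pvInRange (0, 2) i || pvInRange (4, 20) i <;>
  cases h1 : pvInRange (0, 6) i || pvInRange (8, 20) i <;>
  cases h2 : pvInRange (0, 14) i || pvInRange (16, 20) i <;>
    simp [pvMatchSet, pvRulesB, pvM1, h0, h1, h2, PySem.Set.ofList, PySem.Set.add,
      PySem.Set.empty, PySem.Set.contains]

theorem pv_ms2 (i : Int) : (pvMatchSet i).contains 2 = pvM2 i := by
  cases h0 : pvInRange (0, 2) i || pvInRange (4, 20) i <;>
  cases h1 : pvInRange (0, 6) i || pvInRange (8, 20) i <;>
  cases h2 : pvInRange (0, 14) i || pvInRange (16, 20) i <;>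
    simp [pvMatchSet, pvRulesB, pvM2, h0, h1, h2, PySem.Set.ofList, PySem.Set.add,
      PySem.Set.empty, PySem.Set.contains]

theorem pv_A_nf (list_i : List Int) : rule_exclude list_i = pvNF list_i := by
  unfold rule_exclude pvNF
  simp only [pvRules, List.foldl_cons, List.foldl_nil, pv_flag_fold, Bool.true_and]
  have e0 : ∀ i : Int, (!(!pvInRange (0, 2) i && !pvInRange (4, 20) i)) = pvM0 i := by
    intro i; simp [pvM0]
  have e1 : ∀ i : Int, (!(!pvInRange (0, 6) i && !pvInRange (8, 20) i)) = pvM1 i := by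
    intro i; simp [pvM1]
  have e2 : ∀ i : Int, (!(!pvInRange (0, 14) i && !pvInRange (16, 20) i)) = pvM2 i := by
    intro i; simp [pvM2]
  simp only [e0, e1, e2]
  cases hb0 : list_i.all pvM0 <;> cases hb1 : list_i.all pvM1 <;> cases hb2 : list_i.all pvM2 <;>
    simp [PySem.Set.add, PySem.Set.empty, PySem.Set.contains]

theorem pv_B_nf (list_i : List Int) : rule_exclude_alt list_i = pvNF list_i := by
  unfold rule_exclude_alt pvNF
  rw [pv_inter_fold]
  have hacc : (PySem.Set.ofList (pvRulesB.map Prod.fst) : List Int) = [0, 1, 2] := by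
    simp [pvRulesB, PySem.Set.ofList, PySem.Set.add, PySem.Set.empty, PySem.Set.contains]
  rw [hacc]
  simp only [List.filter, pv_ms0, pv_ms1, pv_ms2]
  cases hb0 : list_i.all pvM0 <;> cases hb1 : list_i.all pvM1 <;> cases hb2 : list_i.all pvM2 <;>
    simp_all

-- ===== VERDICT (by name: the statement is the Claim_ definition above) =====
theorem rule_exclude_spec : Claim_equal_rule_exclude := by
  intro list_i _
  show rule_exclude list_i = rule_exclude_alt list_i
  rw [pv_A_nf, pv_B_nf]
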